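-- pv_equiv track=rewrite | github.com/Marius322/Lightweight-Crypto | Numba_Map_Generator.py | generate_chunk2_arrays
-- ===== SOURCE A (Python) =====
-- def generate_chunk2_arrays(k):
--     '''
--
--     Inputs
--     ----------
--     k : Number of digits in a binary number
--
--     Returns
--     -------
--     chunk2_array : List containing all (2, i, j) tuples
--     '''
--
--     C = 2 * k - 2
--     chunk2_array = [None] * C
--     chunk2_array[0], chunk2_array[1] = [], []
--     chunk2_array[2], chunk2_array[3] = [], [] # placeholder for empty first column
--
--     for cl in range(4, C):
--         col = []
--
--         # Case 1 - Col(4) to Col(k)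
--         if cl <= k:
--             base_i, base_j = k - cl + 1, k
--
--         # Case 2 - Col(k) to Col(C)
--         else:
--             base_i, base_j = 1, 2*k - cl
--
--         n = 0
--         for n in range (0, k):
--             i = base_i + n
--             j = base_j - n
--             if i >= j:
--                 break
--             else:
--                 col.append((2, i, j))
--                 n += 1
--
--         # Creating full array
--         chunk2_array[cl] = col if col else []
--
--     return chunk2_array
-- ===== SOURCE B (Python) =====
-- def generate_chunk2_arrays(k):
--     '''Build the result directly as the four placeholder columns plus a
--     comprehension over the remaining columns; each column's tuple count is
--     computed in closed form instead of appending until i >= j and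
--     back-patching a preallocated [None]*C array.'''
--     C = 2 * k - 2
--     if C < 4:
--         # the layout reserves the first four slots as placeholders
--         raise ValueError("k must be at least 3")
--
--     def column(cl):
--         if cl <= k:
--             base_i, base_j = k - cl + 1, k
--         else:
--             base_i, base_j = 1, 2 * k - cl
--         count = max(0, min(k, (base_j - base_i + 1) // 2))
--         return [(2, base_i + n, base_j - n) for n in range(count)]
--
--     return [[], [], [], []] + [column(cl) for cl in range(4, C)]
-- ===== Notes on version B (the rewrite author's own statement) =====
-- stated objective: simpler
-- what changed: A preallocates [None]*C, back-patches it index by index, and fills each column with a break loop appending until i >= j; B builds the result directly as [[],[],[],[]] plus a comprehension over columns, each column produced from a closed-form tuple count max(0, min(k, (base_j-base_i+1)//2)).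
import Mathlib
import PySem

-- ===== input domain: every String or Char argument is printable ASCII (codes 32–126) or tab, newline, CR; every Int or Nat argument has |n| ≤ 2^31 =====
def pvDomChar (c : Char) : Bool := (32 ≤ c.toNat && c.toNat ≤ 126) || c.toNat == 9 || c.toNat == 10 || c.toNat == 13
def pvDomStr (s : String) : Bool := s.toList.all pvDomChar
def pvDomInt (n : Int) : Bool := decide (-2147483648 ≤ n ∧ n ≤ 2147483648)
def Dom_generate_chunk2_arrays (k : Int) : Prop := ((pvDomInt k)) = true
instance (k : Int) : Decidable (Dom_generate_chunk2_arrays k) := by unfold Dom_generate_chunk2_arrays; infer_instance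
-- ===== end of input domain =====

-- B drops A's preallocate-and-patch [None]*C array and its per-column break loop: it builds the
-- result directly as a four-empty-lists prefix plus one comprehension per column with a
-- closed-form tuple count; equality of return values is proved for k ≥ 3 (Pre_).

-- ===== PORT A =====
-- inner 'for n in range(0, k): … break' loop of A (acc = col)
def chunk2Inner (bi bj : Int) : List Int → List (Int × Int × Int) → List (Int × Int × Int)
  | [], col => col
  | n :: ns, col =>
      let i := bi + n
      let j := bj - n
      if i ≥ j then col else chunk2Inner bi bj ns (col ++ [(2, i, j)])

-- body of one iteration of A's outer loop: the branch on cl, then the inner loop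
def chunk2ColA (k cl : Int) : List (Int × Int × Int) :=
  let (base_i, base_j) := if cl ≤ k then (k - cl + 1, k) else (1, 2 * k - cl)
  chunk2Inner base_i base_j (PySem.List.pyRange 0 k 1) []

def generate_chunk2_arrays (k : Int) : List (List (Int × Int × Int)) :=
  let C := 2 * k - 2
  -- [None] * C; the four placeholder assignments (in-range exactly when k ≥ 3 = Pre_)
  let arr := List.replicate C.toNat (none : Option (List (Int × Int × Int)))
  let arr := (arr.set 0 (some [])).set 1 (some [])
  let arr := (arr.set 2 (some [])).set 3 (some [])
  let arr := (PySem.List.pyRange 4 C 1).foldl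
    (fun arr cl =>
      let col := chunk2ColA k cl
      arr.set cl.toNat (some (if col.isEmpty then [] else col))) arr
  -- for k ≥ 3 every slot has been assigned, so no None remains (getD [] is never used)
  arr.map (fun o => o.getD [])

-- ===== PORT B =====
-- Source B's 'column(cl)': closed-form count, then a comprehension
def chunk2Column (k cl : Int) : List (Int × Int × Int) :=
  let (base_i, base_j) := if cl ≤ k then (k - cl + 1, k) else (1, 2 * k - cl)
  let count := max 0 (min k (PySem.Int.floordiv (base_j - base_i + 1) 2))
  (PySem.List.pyRange 0 count 1).map (fun n => (2, base_i + n, base_j - n))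

-- '[[], [], [], []] + [column(cl) for cl in range(4, 2*k-2)]'
def generate_chunk2_arrays_alt (k : Int) : List (List (Int × Int × Int)) :=
  [[], [], [], []] ++ (PySem.List.pyRange 4 (2 * k - 2) 1).map (chunk2Column k)

-- ===== PRECONDITION & SPEC =====
-- Pre_ excludes k ≤ 2, where A's placeholder assignments raise IndexError (C = 2k-2 < 4 slots)
def Pre_generate_chunk2_arrays (k : Int) : Prop := 3 ≤ k
instance (k : Int) : Decidable (Pre_generate_chunk2_arrays k) := by unfold Pre_generate_chunk2_arrays; infer_instance
def pvWitness_generate_chunk2_arrays : Int := (5)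

def Spec_generate_chunk2_arrays (k : Int) (out : List (List (Int × Int × Int))) : Prop := out = generate_chunk2_arrays_alt k
instance (k : Int) (out : List (List (Int × Int × Int))) : Decidable (Spec_generate_chunk2_arrays k out) := by unfold Spec_generate_chunk2_arrays; infer_instance

-- ===== CLAIM (what is proved, stated in full; the proofs are below) =====
def Claim_equal_generate_chunk2_arrays : Prop := ∀ (k : Int), Dom_generate_chunk2_arrays k → Pre_generate_chunk2_arrays k → Spec_generate_chunk2_arrays k (generate_chunk2_arrays k)

-- ===== LEMMAS AND PROOFS =====

theorem if_isEmpty {α : Type} (l : List α) : (if l.isEmpty then ([] : List α) else l) = l := by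
  cases l <;> simp

-- the break loop is a takeWhile
theorem chunk2Inner_eq (bi bj : Int) : ∀ (ns : List Int) (col : List (Int × Int × Int)),
    chunk2Inner bi bj ns col
      = col ++ (ns.takeWhile (fun n => decide (bi + n < bj - n))).map (fun n => (2, bi + n, bj - n)) := by
  intro ns
  induction ns with
  | nil => intro col; simp [chunk2Inner]
  | cons n ns ih =>
      intro col
      simp only [chunk2Inner, List.takeWhile]
      by_cases h : bi + n < bj - n
      · rw [if_neg (by omega), ih, decide_eq_true h]
        simp
      · rw [if_pos (by omega), decide_eq_false h]
        simp

theorem takeWhile_lt_pyRange (c : Int) : ∀ (m : Nat) (a b : Int), (b - a).toNat = m →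
    (PySem.List.pyRange a b 1).takeWhile (fun n => decide (n < c)) = PySem.List.pyRange a (min b c) 1 := by
  intro m
  induction m with
  | zero =>
      intro a b hm
      rw [PySem.List.pyRange_one_eq_nil (by omega), PySem.List.pyRange_one_eq_nil (by omega)]
      simp
  | succ m ih =>
      intro a b hm
      rw [PySem.List.pyRange_one_cons (by omega), List.takeWhile_cons]
      by_cases hac : a < c
      · rw [if_pos (by simpa using hac), ih (a + 1) b (by omega),
          show PySem.List.pyRange a (min b c) 1 = a :: PySem.List.pyRange (a + 1) (min b c) 1 from
            PySem.List.pyRange_one_cons (by omega)]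
      · rw [if_neg (by simpa using hac), PySem.List.pyRange_one_eq_nil (by omega)]

theorem pyRange_zero_max (x : Int) : PySem.List.pyRange 0 x 1 = PySem.List.pyRange 0 (max 0 x) 1 := by
  rw [PySem.List.pyRange_one, PySem.List.pyRange_one]
  have h : (x - 0).toNat = (max 0 x - 0).toNat := by omega
  rw [h]

-- one column: A's break loop equals B's closed form, for columns the loop actually visits
theorem col_eq (k cl : Int) (h4 : 4 ≤ cl) (hC : cl < 2 * k - 2) :
    (if (chunk2ColA k cl).isEmpty then [] else chunk2ColA k cl) = chunk2Column k cl := by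
  rw [if_isEmpty]
  have key : ∀ bi bj : Int, 0 < bj - bi + 1 →
      chunk2Inner bi bj (PySem.List.pyRange 0 k 1) []
        = (PySem.List.pyRange 0 (max 0 (min k (PySem.Int.floordiv (bj - bi + 1) 2))) 1).map
            (fun n => (2, bi + n, bj - n)) := by
    intro bi bj hpos
    rw [chunk2Inner_eq]
    have hfd : PySem.Int.floordiv (bj - bi + 1) 2 = (bj - bi + 1) / 2 :=
      PySem.Int.floordiv_eq_ediv_of_pos (by omega)
    have hpred : (fun n : Int => decide (bi + n < bj - n))
        = (fun n : Int => decide (n < (bj - bi + 1) / 2)) := by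
      funext n
      simp only [decide_eq_decide]
      omega
    rw [hpred, takeWhile_lt_pyRange _ (k - 0).toNat 0 k rfl, hfd, ← pyRange_zero_max]
    simp
  simp only [chunk2ColA, chunk2Column]
  by_cases hk : cl ≤ k
  · simp only [if_pos hk]
    rw [key (k - cl + 1) k (by omega)]
  · simp only [if_neg hk]
    rw [key 1 (2 * k - cl) (by omega)]

-- setting at position done.length
theorem set_append_length {α : Type} : ∀ (done : List α) (x : α) (rest : List α) (v : α),
    (done ++ x :: rest).set done.length v = done ++ v :: rest := by
  intro done
  induction done with
  | nil => intro x rest v; simp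
  | cons d done ih => intro x rest v; simp [ih]

-- A's fill-by-assignment loop over a range produces the mapped columns in order
theorem foldl_set_range {α : Type} (g : Int → α) : ∀ (r : Nat) (a b : Int) (done : List (Option α)),
    0 ≤ a → a ≤ b → (b - a).toNat = r → done.length = a.toNat →
    (PySem.List.pyRange a b 1).foldl
        (fun arr cl => arr.set cl.toNat (some (g cl))) (done ++ List.replicate r none)
      = done ++ (PySem.List.pyRange a b 1).map (fun cl => some (g cl)) := by
  intro r
  induction r with
  | zero =>
      intro a b done _ _ hr _
      rw [PySem.List.pyRange_one_eq_nil (by omega)]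
      simp
  | succ r ih =>
      intro a b done ha hab hr hlen
      rw [PySem.List.pyRange_one_cons (by omega)]
      simp only [List.foldl_cons, List.map_cons, List.replicate_succ]
      rw [← hlen, set_append_length]
      have h1 : done ++ some (g a) :: List.replicate r (none : Option α)
          = (done ++ [some (g a)]) ++ List.replicate r none := by simp
      rw [h1, ih (a + 1) b (done ++ [some (g a)]) (by omega) (by omega) (by omega)
        (by simp [hlen]; omega)]
      simp

-- A's preallocate/assign/read-out frame collapses to a prefix plus a map, for any column function g
theorem fill_eq (k : Int) (hk : 3 ≤ k) (g : Int → List (Int × Int × Int)) :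
    ((PySem.List.pyRange 4 (2 * k - 2) 1).foldl
        (fun arr cl => arr.set cl.toNat (some (g cl)))
        (((((List.replicate (2 * k - 2).toNat (none : Option (List (Int × Int × Int)))).set 0
          (some [])).set 1 (some [])).set 2 (some [])).set 3 (some []))).map (fun o => o.getD [])
      = [[], [], [], []] ++ (PySem.List.pyRange 4 (2 * k - 2) 1).map g := by
  have hinit : ((((List.replicate (2 * k - 2).toNat (none : Option (List (Int × Int × Int)))).set 0
        (some [])).set 1 (some [])).set 2 (some [])).set 3 (some [])
      = [some [], some [], some [], some []] ++ List.replicate ((2 * k - 2).toNat - 4) none := by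
    have h4 : (2 * k - 2).toNat = 4 + ((2 * k - 2).toNat - 4) := by omega
    rw [h4, List.replicate_add]
    simp [List.replicate]
  rw [hinit,
    foldl_set_range g ((2 * k - 2).toNat - 4) 4 (2 * k - 2) [some [], some [], some [], some []]
      (by omega) (by omega) (by omega) (by simp)]
  simp [Function.comp]

theorem main_eq (k : Int) (hk : 3 ≤ k) :
    generate_chunk2_arrays k = generate_chunk2_arrays_alt k := by
  simp only [generate_chunk2_arrays, generate_chunk2_arrays_alt]
  rw [fill_eq k hk]
  apply congrArg
  apply List.map_congr_left
  intro cl hcl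
  rw [PySem.List.mem_pyRange_one] at hcl
  exact col_eq k cl hcl.1 hcl.2

-- ===== VERDICT (by name: the statement is the Claim_ definition above) =====
theorem generate_chunk2_arrays_spec : Claim_equal_generate_chunk2_arrays := by
  intro k _ hk
  exact main_eq k hk
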